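-- pv_equiv track=rewrite | github.com/MariBokeria/home_work-0 | Level-104/homework/python3.py | get_characters_after_letter
-- ===== SOURCE A (Python) =====
-- def get_characters_after_letter(s, letter):
--     s = s.lower()
--     letter = letter.lower()
--
--     result = ""
--
--     for i in range(len(s) - 1):
--         if s[i] == letter and s[i+1].isalpha():
--             result += s[i+1]
--
--     return result
-- ===== SOURCE B (Python) =====
-- def get_characters_after_letter(s, letter):
--     s = s.lower()
--     letter = letter.lower()
--     if len(letter) != 1:
--         return ""
--     out = []
--     idx = s.find(letter)
--     while 0 <= idx < len(s) - 1:
--         nxt = s[idx + 1]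
--         if nxt.isalpha():
--             out.append(nxt)
--         idx = s.find(letter, idx + 1)
--     return "".join(out)
-- ===== Notes on version B (the rewrite author's own statement) =====
-- stated objective: alternative
-- what changed: replaces the per-index scan (compare s[i] to letter at every position) by occurrence hopping with str.find: after an early exit when the lowered letter is not a single character, the loop jumps directly from one occurrence of the letter to the next and collects the following character, joining a list at the end instead of repeated string concatenation.
import Mathlib
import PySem

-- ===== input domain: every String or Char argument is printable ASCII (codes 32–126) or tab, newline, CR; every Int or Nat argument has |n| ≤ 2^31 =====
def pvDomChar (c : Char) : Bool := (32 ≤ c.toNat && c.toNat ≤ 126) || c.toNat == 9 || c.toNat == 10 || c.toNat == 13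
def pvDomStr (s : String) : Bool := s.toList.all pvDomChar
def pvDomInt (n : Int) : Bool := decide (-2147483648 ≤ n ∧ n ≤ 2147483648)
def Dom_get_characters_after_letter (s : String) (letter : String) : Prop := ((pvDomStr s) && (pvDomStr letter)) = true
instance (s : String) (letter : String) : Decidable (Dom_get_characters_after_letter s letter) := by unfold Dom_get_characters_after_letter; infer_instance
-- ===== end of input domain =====

-- B replaces A's per-index scan by str.find occurrence hopping (plus a single-character guard on the lowered letter); equal output proved on the whole domain.


-- ===== PORT A =====
def get_characters_after_letter (s : String) (letter : String) : String :=
  let t := PySem.Chars.lower s.toList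
  let l := PySem.Chars.lower letter.toList
  let result := (PySem.List.pyRange 0 ((t.length : Int) - 1) 1).foldl
    (fun acc i =>
      if [PySem.List.pyGetD t i 'a'] = l ∧ PySem.Chars.strIsalpha [PySem.List.pyGetD t (i + 1) 'a'] = true then
        acc ++ [PySem.List.pyGetD t (i + 1) 'a']
      else acc) []
  String.ofList result

-- ===== PORT B =====
-- the while loop: idx hops from one occurrence of the letter to the next via find; fuel only makes it total
def pvFindLoop (t : List Char) (l : List Char) : Nat → Int → List Char → List Char
  | 0, _, acc => acc
  | fuel + 1, idx, acc =>
    if 0 ≤ idx ∧ idx < (t.length : Int) - 1 then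
      let nxt := PySem.List.pyGetD t (idx + 1) 'a'
      let acc' := if PySem.Chars.strIsalpha [nxt] = true then acc ++ [nxt] else acc
      pvFindLoop t l fuel (PySem.Chars.findFrom t l (idx + 1) none) acc'
    else acc

def get_characters_after_letter_alt (s : String) (letter : String) : String :=
  let t := PySem.Chars.lower s.toList
  let l := PySem.Chars.lower letter.toList
  if l.length ≠ 1 then "" else
  String.ofList (pvFindLoop t l t.length (PySem.Chars.find t l) [])

-- ===== PRECONDITION & SPEC =====
def Spec_get_characters_after_letter (s : String) (letter : String) (out : String) : Prop := out = get_characters_after_letter_alt s letter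
instance (s : String) (letter : String) (out : String) : Decidable (Spec_get_characters_after_letter s letter out) := by unfold Spec_get_characters_after_letter; infer_instance

-- ===== CLAIM (what is proved, stated in full; the proofs are below) =====
def Claim_equal_get_characters_after_letter : Prop := ∀ (s : String) (letter : String), Dom_get_characters_after_letter s letter → Spec_get_characters_after_letter s letter (get_characters_after_letter s letter)

-- ===== LEMMAS AND PROOFS =====

-- A's loop body, abstracted over the (lowered) text and letter
def pvStep (t : List Char) (l : List Char) (acc : List Char) (i : Int) : List Char :=
  if [PySem.List.pyGetD t i 'a'] = l ∧ PySem.Chars.strIsalpha [PySem.List.pyGetD t (i + 1) 'a'] = true then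
    acc ++ [PySem.List.pyGetD t (i + 1) 'a']
  else acc

lemma singleton_prefix_drop {t : List Char} {c : Char} {i : Nat} :
    [c] <+: t.drop i ↔ t[i]? = some c := by
  rw [← List.head?_drop]
  cases h : t.drop i with
  | nil => simp
  | cons a as => simp [List.cons_prefix_cons, eq_comm]

lemma foldl_step_noop_gen (f : List Char → Int → List Char) (L : List Int) (acc : List Char)
    (h : ∀ (a : List Char) (i : Int), i ∈ L → f a i = a) :
    L.foldl f acc = acc := by
  induction L generalizing acc with
  | nil => rfl
  | cons x xs ih =>
    rw [List.foldl_cons, h acc x (by simp)]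
    exact ih acc (fun a i hi => h a i (by simp [hi]))

lemma foldl_step_noop (t : List Char) (c : Char) (a b : Int) (acc : List Char)
    (h0 : 0 ≤ a) (hb : b ≤ (t.length : Int))
    (h : ∀ i : Int, a ≤ i → i < b → t[i.toNat]? ≠ some c) :
    (PySem.List.pyRange a b 1).foldl (pvStep t [c]) acc = acc := by
  apply foldl_step_noop_gen
  intro acc' i hi
  rw [PySem.List.mem_pyRange_one] at hi
  unfold pvStep
  rw [if_neg]
  rintro ⟨h1, -⟩
  apply h i hi.1 hi.2
  rw [PySem.List.pyGetD_eq_getElem t 'a' (by omega) (by omega)] at h1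
  simp only [List.cons.injEq, and_true] at h1
  rw [List.getElem?_eq_getElem (by omega), h1]

lemma foldl_step_noop_ne_one (t l : List Char) (hl : l.length ≠ 1) (a b : Int) (acc : List Char) :
    (PySem.List.pyRange a b 1).foldl (pvStep t l) acc = acc := by
  apply foldl_step_noop_gen
  intro acc' i _
  unfold pvStep
  rw [if_neg]
  rintro ⟨h1, -⟩
  exact hl (by rw [← h1]; rfl)

lemma key_lemma (t : List Char) (c : Char) :
    ∀ (m p : Nat) (acc : List Char), p ≤ t.length → t.length - p ≤ m →
    pvFindLoop t [c] m (PySem.Chars.findFrom t [c] (p : Int) none) acc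
      = (PySem.List.pyRange (p : Int) ((t.length : Int) - 1) 1).foldl (pvStep t [c]) acc := by
  intro m
  induction m with
  | zero =>
    intro p acc hp hm
    have hpn : p = t.length := by omega
    rw [PySem.List.pyRange_one_eq_nil (by omega)]
    rfl
  | succ m ih =>
    intro p acc hp hm
    by_cases hj : PySem.Chars.findFrom t [c] (p : Int) none = -1
    · rw [hj]
      show (if (0 : Int) ≤ -1 ∧ _ then _ else acc) = _
      rw [if_neg (by omega)]
      rw [foldl_step_noop t c p ((t.length : Int) - 1) acc (by omega) (by omega)]
      intro i hi1 hi2 hc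
      have hinf : [c] <:+: t.drop p := by
        have h1 : [c] <+: t.drop i.toNat := singleton_prefix_drop.mpr hc
        have h2 : t.drop i.toNat <:+ t.drop p := by
          have : t.drop i.toNat = (t.drop p).drop (i.toNat - p) := by
            rw [List.drop_drop]; congr 1; omega
          rw [this]; exact List.drop_suffix _ _
        exact h1.isInfix.trans h2.isInfix
      exact (PySem.Chars.findFrom_natCast_eq_neg_one_iff t [c] p hp).mp hj hinf
    · obtain ⟨hpj, hpre, hmin⟩ := PySem.Chars.findFrom_natCast_spec t [c] p hp hj
      set j := PySem.Chars.findFrom t [c] (p : Int) none with hjdef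
      have hjc : t[j.toNat]? = some c := singleton_prefix_drop.mp hpre
      have hjlt : j.toNat < t.length := by
        rcases List.getElem?_eq_some_iff.mp hjc with ⟨h, -⟩; exact h
      have hj0 : 0 ≤ j := le_trans (by omega) hpj
      have hjn : (j.toNat : Int) = j := Int.toNat_of_nonneg hj0
      by_cases hlast : j.toNat + 1 < t.length
      · -- guard holds: one more iteration
        show (if (0 : Int) ≤ j ∧ j < (t.length : Int) - 1 then _ else acc) = _
        rw [if_pos ⟨hj0, by omega⟩]
        have hjcast : j + 1 = ((j.toNat + 1 : Nat) : Int) := by push_cast; omega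
        have hA : j.toNat + 1 ≤ t.length := by omega
        have hB : t.length - (j.toNat + 1) ≤ m := by omega
        dsimp only
        rw [hjcast, ih (j.toNat + 1) _ hA hB]
        -- split A's range at j
        rw [PySem.List.pyRange_one_append (p : Int) (j.toNat : Int) ((t.length : Int) - 1)
              (by omega) (by omega),
            List.foldl_append,
            PySem.List.pyRange_one_cons (a := (j.toNat : Int)) (by omega),
            List.foldl_cons]
        rw [foldl_step_noop t c (p : Int) (j.toNat : Int) acc (by omega) (by omega)
              (by intro i hi1 hi2 hci
                  exact hmin i.toNat (by omega) (by omega) (singleton_prefix_drop.mpr hci))]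
        -- A's step at index j builds exactly B's next accumulator
        have hstep : pvStep t [c] acc ((j.toNat : Int)) =
            (if PySem.Chars.strIsalpha [PySem.List.pyGetD t (j + 1) 'a'] = true then
              acc ++ [PySem.List.pyGetD t (j + 1) 'a'] else acc) := by
          unfold pvStep
          have hgetj : PySem.List.pyGetD t (j.toNat : Int) 'a' = c := by
            rw [PySem.List.pyGetD_eq_getElem t 'a' (by omega) (by omega)]
            simp only [Int.toNat_natCast]
            exact Option.some.inj ((List.getElem?_eq_getElem hjlt).symm.trans hjc)
          have hnxt : PySem.List.pyGetD t ((j.toNat : Int) + 1) 'a' = PySem.List.pyGetD t (j + 1) 'a' := by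
            congr 1; omega
          rw [hgetj, hnxt]
          by_cases hal : PySem.Chars.strIsalpha [PySem.List.pyGetD t (j + 1) 'a'] = true
          · rw [if_pos ⟨rfl, hal⟩, if_pos hal]
          · rw [if_neg (by rintro ⟨-, h⟩; exact hal h), if_neg hal]
        rw [hstep]
        have hr : ((j.toNat + 1 : Nat) : Int) = (j.toNat : Int) + 1 := by push_cast; rfl
        rw [hr, hjn]
      · -- j is the last index: guard fails, and no hit in [p, len-1)
        show (if (0 : Int) ≤ j ∧ j < (t.length : Int) - 1 then _ else acc) = _
        rw [if_neg (by rintro ⟨-, h⟩; omega)]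
        rw [foldl_step_noop t c (p : Int) ((t.length : Int) - 1) acc (by omega) (by omega)]
        intro i hi1 hi2 hci
        exact hmin i.toNat (by omega) (by omega) (singleton_prefix_drop.mpr hci)

-- ===== VERDICT (by name: the statement is the Claim_ definition above) =====
theorem get_characters_after_letter_spec : Claim_equal_get_characters_after_letter := by
  intro s letter _
  unfold Spec_get_characters_after_letter get_characters_after_letter get_characters_after_letter_alt
  dsimp only
  generalize PySem.Chars.lower s.toList = t
  generalize PySem.Chars.lower letter.toList = l
  by_cases h1 : l.length = 1
  · obtain ⟨c, hc⟩ := List.length_eq_one_iff.mp h1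
    rw [hc]
    rw [if_neg (by simp)]
    rw [← PySem.Chars.findFrom_zero t [c]]
    rw [show ((0 : Int) = ((0 : Nat) : Int)) from rfl]
    rw [key_lemma t c t.length 0 [] (Nat.zero_le _) (by omega)]
    rfl
  · rw [if_pos h1]
    rw [show (PySem.List.pyRange 0 ((t.length : Int) - 1) 1).foldl
      (fun acc i =>
        if [PySem.List.pyGetD t i 'a'] = l ∧ PySem.Chars.strIsalpha [PySem.List.pyGetD t (i + 1) 'a'] = true then
          acc ++ [PySem.List.pyGetD t (i + 1) 'a']
        else acc) [] = (PySem.List.pyRange 0 ((t.length : Int) - 1) 1).foldl (pvStep t l) [] from rfl]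
    rw [foldl_step_noop_ne_one t l h1]
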